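-- pv_equiv track=rewrite | github.com/apbadhani/AMR | APOORV BADHANI, 1800132, ASSIGNMENT-1/di ring.py | Matgen
-- ===== SOURCE A (Python) =====
-- def Matgen(x, y, z, n):
--     Y = []
--     i = 0
--     while i < n:
--         X = []
--         j = 0
--         while j < n:
--             X.append(0)
--             j = j + 1
--         Y.append(X)
--         i = i + 1
--     for i in range(n):
--         for j in range(n):
--             if (i == j):
--                 Y[i][j] = x
--                 if i >= n - 1:
--                     break
--                 else:
--                     Y[i + 1][j] = y
--                 if j >= n - 1:
--                     break
--                 else:
--                     Y[i][j + 1] = y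
--     i = 0
--     while i < n:
--         Y[i][i] = z
--         i = i + 2
--
--     Y[0][n - 1] = y
--     Y[n - 1][0] = y
--     i = 0
--     j = 0
--
--     return Y
-- ===== SOURCE B (Python) =====
-- def Matgen(x, y, z, n):
--     Y = [[z if i == j and i % 2 == 0 else
--           x if i == j else
--           y if abs(i - j) == 1 else 0
--           for j in range(n)]
--          for i in range(n)]
--     Y[0][n - 1] = y
--     Y[n - 1][0] = y
--     return Y
-- ===== Notes on version B (the rewrite author's own statement) =====
-- stated objective: simpler
-- what changed: B computes every cell directly from its indices in one nested comprehension (z on the even diagonal, x on the odd diagonal, y on the |i-j|=1 band, 0 elsewhere) and then applies the two corner assignments, replacing A's zero-allocation pass plus three separate overwriting passes.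
import Mathlib
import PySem

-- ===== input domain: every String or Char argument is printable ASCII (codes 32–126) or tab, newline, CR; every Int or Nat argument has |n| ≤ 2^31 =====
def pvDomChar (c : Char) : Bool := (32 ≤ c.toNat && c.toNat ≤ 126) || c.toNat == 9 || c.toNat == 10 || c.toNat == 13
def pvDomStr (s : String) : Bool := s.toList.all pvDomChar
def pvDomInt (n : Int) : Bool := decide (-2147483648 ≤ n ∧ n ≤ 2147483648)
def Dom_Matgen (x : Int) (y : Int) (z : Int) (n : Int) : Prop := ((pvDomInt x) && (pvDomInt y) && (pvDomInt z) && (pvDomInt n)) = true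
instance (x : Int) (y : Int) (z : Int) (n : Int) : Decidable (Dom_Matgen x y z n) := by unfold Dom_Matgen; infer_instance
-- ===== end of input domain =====

-- B builds the matrix by one direct per-cell computation instead of A's zero-fill plus three
-- overwriting passes; same O(n^2) cost, simpler structure. Equivalence is on return values.

-- ===== PORT A =====
-- 'Y[i][j] = v'; under Pre_Matgen every index used is nonnegative and in range, so .toNat is exact
def pvSetCell (Y : List (List Int)) (i j : Int) (v : Int) : List (List Int) :=
  Y.set i.toNat ((Y.getD i.toNat []).set j.toNat v)

-- 'while j < n: X.append(0); j += 1' — fuel = number of iterations, n.toNat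
def pvZeroRow (fuel : Nat) (X : List Int) : List Int :=
  match fuel with
  | 0 => X
  | f + 1 => pvZeroRow f (X ++ [0])

-- 'while i < n: … Y.append(X); i += 1'
def pvZeros (fuel rowFuel : Nat) (Y : List (List Int)) : List (List Int) :=
  match fuel with
  | 0 => Y
  | f + 1 => pvZeros f rowFuel (Y ++ [pvZeroRow rowFuel []])

-- inner 'for j in range(n)' with its breaks
def pvPass1Inner (x y n i : Int) (Y : List (List Int)) : List Int → List (List Int)
  | [] => Y
  | j :: js =>
    if i = j then
      let Y1 := pvSetCell Y i j x
      if i ≥ n - 1 then Y1                              -- break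
      else
        let Y2 := pvSetCell Y1 (i + 1) j y
        if j ≥ n - 1 then Y2                            -- break
        else pvPass1Inner x y n i (pvSetCell Y2 i (j + 1) y) js
    else pvPass1Inner x y n i Y js

-- 'for i in range(n): for j in range(n): …'
def pvPass1 (x y n : Int) (Y : List (List Int)) : List (List Int) :=
  (PySem.List.pyRange 0 n 1).foldl
    (fun Y i => pvPass1Inner x y n i Y (PySem.List.pyRange 0 n 1)) Y

-- 'i = 0; while i < n: Y[i][i] = z; i += 2' — fuel = n.toNat bounds the iteration count
def pvZDiag (z n : Int) (fuel : Nat) (i : Int) (Y : List (List Int)) : List (List Int) :=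
  match fuel with
  | 0 => Y
  | f + 1 => if i < n then pvZDiag z n f (i + 2) (pvSetCell Y i i z) else Y

def Matgen (x : Int) (y : Int) (z : Int) (n : Int) : List (List Int) :=
  let Y0 := pvZeros n.toNat n.toNat []
  let Y1 := pvPass1 x y n Y0
  let Y2 := pvZDiag z n n.toNat 0 Y1
  let Y3 := pvSetCell Y2 0 (n - 1) y
  pvSetCell Y3 (n - 1) 0 y

-- ===== PORT B =====
def pvCellB (x y z : Int) (i j : Int) : Int :=
  if i = j ∧ PySem.Int.mod i 2 = 0 then z
  else if i = j then x
  else if (i - j).natAbs = 1 then y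
  else 0

def Matgen_alt (x : Int) (y : Int) (z : Int) (n : Int) : List (List Int) :=
  let Y := (PySem.List.pyRange 0 n 1).map (fun i =>
    (PySem.List.pyRange 0 n 1).map (fun j => pvCellB x y z i j))
  pvSetCell (pvSetCell Y 0 (n - 1) y) (n - 1) 0 y

-- ===== PRECONDITION & SPEC =====
-- A raises IndexError on the trailing corner assignments when n ≤ 0 (Y is empty); B raises there too.
def Pre_Matgen (x : Int) (y : Int) (z : Int) (n : Int) : Prop := 1 ≤ n
instance (x : Int) (y : Int) (z : Int) (n : Int) : Decidable (Pre_Matgen x y z n) := by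
  unfold Pre_Matgen; infer_instance

def pvWitness_Matgen : Int × Int × Int × Int := (1, 2, 3, 4)

def Spec_Matgen (x : Int) (y : Int) (z : Int) (n : Int) (out : List (List Int)) : Prop := out = Matgen_alt x y z n
instance (x : Int) (y : Int) (z : Int) (n : Int) (out : List (List Int)) : Decidable (Spec_Matgen x y z n out) := by unfold Spec_Matgen; infer_instance

-- ===== CLAIM (what is proved, stated in full; the proofs are below) =====
def Claim_equal_Matgen : Prop := ∀ (x : Int) (y : Int) (z : Int) (n : Int), Dom_Matgen x y z n → Pre_Matgen x y z n → Spec_Matgen x y z n (Matgen x y z n)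

-- ===== LEMMAS AND PROOFS =====

-- cell read and shape of an m×m matrix-as-list
def pvMget (Y : List (List Int)) (i j : Nat) : Int := (Y.getD i []).getD j 0
def pvShape (m : Nat) (Y : List (List Int)) : Prop :=
  Y.length = m ∧ ∀ i, i < m → (Y[i]?.getD []).length = m

theorem pvZeroRow_eq (f : Nat) (X : List Int) : pvZeroRow f X = X ++ List.replicate f 0 := by
  induction f generalizing X with
  | zero => simp [pvZeroRow]
  | succ f ih => simp [pvZeroRow, ih, List.replicate_succ]

theorem pvZeros_eq (f r : Nat) (Y : List (List Int)) :
    pvZeros f r Y = Y ++ List.replicate f (List.replicate r 0) := by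
  induction f generalizing Y with
  | zero => simp [pvZeros]
  | succ f ih => simp [pvZeros, ih, pvZeroRow_eq, List.replicate_succ]

theorem pvShape_zeros (m : Nat) : pvShape m (List.replicate m (List.replicate m 0)) := by
  refine ⟨by simp, ?_⟩
  intro i hi
  simp [hi]

theorem pvMget_zeros (m i j : Nat) : pvMget (List.replicate m (List.replicate m 0)) i j = 0 := by
  by_cases hi : i < m <;> by_cases hj : j < m <;>
    simp [pvMget, List.getD_eq_getElem?_getD, hi, hj]

theorem pvShape_setCell {m : Nat} {Y : List (List Int)} (hY : pvShape m Y)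
    (a b : Nat) (v : Int) : pvShape m (pvSetCell Y (a : Int) (b : Int) v) := by
  obtain ⟨hlen, hrow⟩ := hY
  refine ⟨by simp [pvSetCell, hlen], ?_⟩
  intro i hi
  simp only [pvSetCell, Int.toNat_natCast, List.getElem?_set]
  split_ifs with h1 h2
  · subst h1
    simpa [List.length_set] using hrow a hi
  · exact absurd (hlen ▸ (h1 ▸ hi)) h2
  · exact hrow i hi

theorem pvMget_setCell {m : Nat} {Y : List (List Int)} (hY : pvShape m Y)
    (a b i j : Nat) (v : Int) (ha : a < m) (hb : b < m) (hi : i < m) (hj : j < m) :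
    pvMget (pvSetCell Y (a : Int) (b : Int) v) i j
      = if a = i ∧ b = j then v else pvMget Y i j := by
  obtain ⟨hlen, hrow⟩ := hY
  have hrl : (Y[a]?.getD []).length = m := hrow a ha
  simp only [pvSetCell, pvMget, Int.toNat_natCast, List.getD_eq_getElem?_getD,
    List.getElem?_set]
  by_cases hai : a = i
  · subst hai
    rw [if_pos rfl, if_pos (by omega : a < Y.length)]
    simp only [Option.getD_some, List.getElem?_set]
    by_cases hbj : b = j
    · subst hbj
      rw [if_pos rfl, if_pos (by omega : b < (Y[a]?.getD []).length)]
      simp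
    · rw [if_neg hbj, if_neg (fun h => hbj h.2)]
  · rw [if_neg hai, if_neg (fun h : a = i ∧ b = j => hai h.1)]

theorem pvPass1Inner_skip (x y n i : Int) (Y : List (List Int)) (js : List Int)
    (h : ∀ j ∈ js, j ≠ i) : pvPass1Inner x y n i Y js = Y := by
  induction js with
  | nil => rfl
  | cons j js ih =>
    have hji : i ≠ j := fun e => h j (by simp) e.symm
    simp only [pvPass1Inner, if_neg hji]
    exact ih (fun j hj => h j (by simp [hj]))

theorem pvPass1Inner_step (x y n i : Int) (Y : List (List Int)) (l1 l2 : List Int)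
    (h1 : ∀ j ∈ l1, j ≠ i) (h2 : ∀ j ∈ l2, j ≠ i) :
    pvPass1Inner x y n i Y (l1 ++ i :: l2)
      = if i ≥ n - 1 then pvSetCell Y i i x
        else pvSetCell (pvSetCell (pvSetCell Y i i x) (i + 1) i y) i (i + 1) y := by
  induction l1 generalizing Y with
  | nil =>
    simp only [List.nil_append, pvPass1Inner]
    by_cases hbr : i ≥ n - 1
    · simp [hbr]
    · simp only [if_neg hbr]
      exact pvPass1Inner_skip x y n i _ l2 h2
  | cons j l1 ih =>
    have hji : i ≠ j := fun e => h1 j (by simp) e.symm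
    simp only [List.cons_append, pvPass1Inner, if_neg hji]
    exact ih Y (fun j hj => h1 j (by simp [hj]))

-- cell values after pass 1 has processed rows 0..k-1 (m = matrix size)
def pvF1 (x y : Int) (m k i j : Nat) : Int :=
  if i = j ∧ i < k then x
  else if j = i + 1 ∧ i < k ∧ i + 1 < m then y
  else if i = j + 1 ∧ j < k ∧ j + 1 < m then y
  else 0

theorem pvPass1_invariant (x y : Int) (m : Nat) :
    ∀ k, k ≤ m →
    pvShape m ((PySem.List.pyRange 0 (k : Int) 1).foldl
        (fun Y i => pvPass1Inner x y (m : Int) i Y (PySem.List.pyRange 0 (m : Int) 1))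
        (List.replicate m (List.replicate m 0)))
    ∧ ∀ i j, i < m → j < m →
        pvMget ((PySem.List.pyRange 0 (k : Int) 1).foldl
          (fun Y i => pvPass1Inner x y (m : Int) i Y (PySem.List.pyRange 0 (m : Int) 1))
          (List.replicate m (List.replicate m 0))) i j = pvF1 x y m k i j := by
  intro k
  induction k with
  | zero =>
    intro _
    rw [show ((0 : Nat) : Int) = 0 by simp, PySem.List.pyRange_one_eq_nil (le_refl 0),
      List.foldl_nil]
    refine ⟨pvShape_zeros m, ?_⟩
    intro i j hi hj
    rw [pvMget_zeros]
    simp [pvF1]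
  | succ k ih =>
    intro hk
    have hkm : k < m := hk
    obtain ⟨hSh, hMg⟩ := ih (Nat.le_of_lt hkm)
    have hsplit : PySem.List.pyRange 0 ((k + 1 : Nat) : Int) 1
        = PySem.List.pyRange 0 (k : Int) 1 ++ [(k : Int)] := by
      rw [show ((k + 1 : Nat) : Int) = (k : Int) + 1 by push_cast; ring]
      exact PySem.List.pyRange_one_succ_right (Int.natCast_nonneg k)
    rw [hsplit, List.foldl_append, List.foldl_cons, List.foldl_nil]
    set Y := (PySem.List.pyRange 0 (k : Int) 1).foldl
      (fun Y i => pvPass1Inner x y (m : Int) i Y (PySem.List.pyRange 0 (m : Int) 1))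
      (List.replicate m (List.replicate m 0)) with hYdef
    have hrange : PySem.List.pyRange 0 (m : Int) 1
        = PySem.List.pyRange 0 (k : Int) 1 ++ ((k : Int) :: PySem.List.pyRange ((k : Int) + 1) (m : Int) 1) := by
      rw [PySem.List.pyRange_one_append 0 (k : Int) (m : Int) (by omega) (by omega)]
      rw [PySem.List.pyRange_one_cons (show (k : Int) < (m : Int) by omega)]
    have hL1 : ∀ j ∈ PySem.List.pyRange 0 (k : Int) 1, j ≠ (k : Int) := by
      intro j hj
      rw [PySem.List.mem_pyRange_one] at hj
      omega
    have hL2 : ∀ j ∈ PySem.List.pyRange ((k : Int) + 1) (m : Int) 1, j ≠ (k : Int) := by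
      intro j hj
      rw [PySem.List.mem_pyRange_one] at hj
      omega
    rw [hrange, pvPass1Inner_step x y (m : Int) (k : Int) Y _ _ hL1 hL2]
    by_cases hlast : (k : Int) ≥ (m : Int) - 1
    · -- k = m - 1 : only Y[k][k] = x
      rw [if_pos hlast]
      refine ⟨pvShape_setCell hSh k k x, ?_⟩
      intro i j hi hj
      rw [pvMget_setCell hSh k k i j x hkm hkm hi hj, hMg i j hi hj]
      unfold pvF1
      split_ifs <;> first | rfl | omega
    · -- k < m - 1 : Y[k][k] = x, Y[k+1][k] = y, Y[k][k+1] = y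
      rw [if_neg hlast]
      have hk1 : k + 1 < m := by omega
      have h1 : pvShape m (pvSetCell Y (k : Int) (k : Int) x) := pvShape_setCell hSh k k x
      rw [show ((k : Int) + 1) = ((k + 1 : Nat) : Int) by push_cast; ring]
      have h2 : pvShape m (pvSetCell (pvSetCell Y (k : Int) (k : Int) x) ((k + 1 : Nat) : Int) (k : Int) y) :=
        pvShape_setCell h1 (k + 1) k y
      refine ⟨pvShape_setCell h2 k (k + 1) y, ?_⟩
      intro i j hi hj
      rw [pvMget_setCell h2 k (k + 1) i j y hkm hk1 hi hj,
        pvMget_setCell h1 (k + 1) k i j y hk1 hkm hi hj,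
        pvMget_setCell hSh k k i j x hkm hkm hi hj, hMg i j hi hj]
      unfold pvF1
      split_ifs <;> first | rfl | omega

theorem pvZDiag_invariant (z : Int) (m : Nat) (fuel : Nat) :
    ∀ (i0 : Int) (Y : List (List Int)), 0 ≤ i0 → pvShape m Y → (m : Int) ≤ i0 + 2 * fuel →
    pvShape m (pvZDiag z (m : Int) fuel i0 Y)
    ∧ ∀ a b, a < m → b < m →
        pvMget (pvZDiag z (m : Int) fuel i0 Y) a b
          = if a = b ∧ i0 ≤ (a : Int) ∧ ((a : Int) - i0) % 2 = 0 then z else pvMget Y a b := by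
  induction fuel with
  | zero =>
    intro i0 Y h0 hY hfuel
    refine ⟨hY, ?_⟩
    intro a b ha hb
    rw [if_neg (by omega)]
    rfl
  | succ f ih =>
    intro i0 Y h0 hY hfuel
    by_cases hlt : i0 < (m : Int)
    · obtain ⟨a0, rfl⟩ : ∃ a0 : Nat, i0 = (a0 : Int) := ⟨i0.toNat, by omega⟩
      have ha0m : a0 < m := by exact_mod_cast hlt
      simp only [pvZDiag, if_pos hlt]
      have hS : pvShape m (pvSetCell Y (a0 : Int) (a0 : Int) z) := pvShape_setCell hY a0 a0 z
      obtain ⟨hSh2, hMg2⟩ := ih ((a0 : Int) + 2) _ (by omega) hS (by omega)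
      refine ⟨hSh2, ?_⟩
      intro a b ha hb
      rw [hMg2 a b ha hb, pvMget_setCell hY a0 a0 a b z ha0m ha0m ha hb]
      split_ifs <;> first | rfl | omega
    · simp only [pvZDiag, if_neg hlt]
      refine ⟨hY, ?_⟩
      intro a b ha hb
      rw [if_neg (by omega)]

theorem pvMat_ext {m : Nat} {Y Z : List (List Int)} (hY : pvShape m Y) (hZ : pvShape m Z)
    (h : ∀ i j, i < m → j < m → pvMget Y i j = pvMget Z i j) : Y = Z := by
  obtain ⟨hYl, hYr⟩ := hY
  obtain ⟨hZl, hZr⟩ := hZ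
  apply List.ext_getElem (by omega)
  intro i hi1 hi2
  have him : i < m := by omega
  have hYrow : Y[i]?.getD [] = Y[i] := by rw [List.getElem?_eq_getElem hi1]; rfl
  have hZrow : Z[i]?.getD [] = Z[i] := by rw [List.getElem?_eq_getElem hi2]; rfl
  have hYL : (Y[i]).length = m := by rw [← hYrow]; exact hYr i him
  have hZL : (Z[i]).length = m := by rw [← hZrow]; exact hZr i him
  apply List.ext_getElem (by omega)
  intro j hj1 hj2
  have hjm : j < m := by omega
  have hc := h i j him hjm
  simp only [pvMget, List.getD_eq_getElem?_getD, hYrow, hZrow] at hc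
  rw [List.getElem?_eq_getElem hj1, List.getElem?_eq_getElem hj2] at hc
  simpa using hc

-- B's base matrix: shape and cells
theorem pvShape_altBase (x y z : Int) (m : Nat) :
    pvShape m ((PySem.List.pyRange 0 (m : Int) 1).map (fun i =>
      (PySem.List.pyRange 0 (m : Int) 1).map (fun j => pvCellB x y z i j))) := by
  have hL : (PySem.List.pyRange 0 (m : Int) 1).length = m := by
    rw [PySem.List.length_pyRange_one]; omega
  refine ⟨by simp [hL], ?_⟩
  intro i hi
  rw [List.getElem?_eq_getElem (by simp [hL]; omega)]
  simp [hL]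

theorem pvMget_altBase (x y z : Int) (m : Nat) (i j : Nat) (hi : i < m) (hj : j < m) :
    pvMget ((PySem.List.pyRange 0 (m : Int) 1).map (fun i =>
      (PySem.List.pyRange 0 (m : Int) 1).map (fun j => pvCellB x y z i j))) i j
    = pvCellB x y z (i : Int) (j : Int) := by
  have hL : (PySem.List.pyRange 0 (m : Int) 1).length = m := by
    rw [PySem.List.length_pyRange_one]; omega
  simp only [pvMget, List.getD_eq_getElem?_getD]
  rw [List.getElem?_eq_getElem (by simp [hL]; omega : i < ((PySem.List.pyRange 0 (m : Int) 1).map (fun i =>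
      (PySem.List.pyRange 0 (m : Int) 1).map (fun j => pvCellB x y z i j))).length)]
  simp only [List.getElem_map, Option.getD_some]
  rw [List.getElem?_eq_getElem (by simp [hL]; omega : j < ((PySem.List.pyRange 0 (m : Int) 1).map
      (fun j' => pvCellB x y z ((PySem.List.pyRange 0 (m : Int) 1)[i]) j')).length)]
  simp only [List.getElem_map, Option.getD_some]
  simp only [PySem.List.getElem_pyRange_one]
  norm_num

-- ===== VERDICT (by name: the statement is the Claim_ definition above) =====
theorem Matgen_spec : Claim_equal_Matgen := by
  intro x y z n _ hpre
  unfold Pre_Matgen at hpre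
  obtain ⟨m, rfl⟩ : ∃ m : Nat, n = (m : Int) := ⟨n.toNat, by omega⟩
  have hm : 1 ≤ m := by exact_mod_cast hpre
  simp only [Spec_Matgen, Matgen, Matgen_alt, pvPass1, Int.toNat_natCast, pvZeros_eq,
    List.nil_append]
  obtain ⟨hSh1, hMg1⟩ := pvPass1_invariant x y m m (le_refl m)
  obtain ⟨hSh2, hMg2⟩ := pvZDiag_invariant z m m 0
    ((PySem.List.pyRange 0 (m : Int) 1).foldl
      (fun Y i => pvPass1Inner x y (m : Int) i Y (PySem.List.pyRange 0 (m : Int) 1))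
      (List.replicate m (List.replicate m 0))) (le_refl 0) hSh1 (by omega)
  have hbase :
      pvZDiag z (m : Int) m 0
        ((PySem.List.pyRange 0 (m : Int) 1).foldl
          (fun Y i => pvPass1Inner x y (m : Int) i Y (PySem.List.pyRange 0 (m : Int) 1))
          (List.replicate m (List.replicate m 0)))
      = (PySem.List.pyRange 0 (m : Int) 1).map (fun i =>
          (PySem.List.pyRange 0 (m : Int) 1).map (fun j => pvCellB x y z i j)) := by
    apply pvMat_ext hSh2 (pvShape_altBase x y z m)
    intro i j hi hj
    rw [hMg2 i j hi hj, hMg1 i j hi hj, pvMget_altBase x y z m i j hi hj]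
    have hmod : PySem.Int.mod (i : Int) 2 = ((i % 2 : Nat) : Int) := by
      exact_mod_cast PySem.Int.mod_natCast i 2
    unfold pvF1 pvCellB
    rw [hmod]
    split_ifs <;> first | rfl | omega
  rw [hbase]
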